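-- pv_equiv track=rewrite | github.com/Rugbeat90999/Character | LocalLibrary.py | check_attr
-- ===== SOURCE A (Python) =====
-- def check_attr(class_dict:dict) -> list[str]:
--   li = []
--   class_dict = dict(class_dict)
--   pop_list = ["register", "all", "registered", "names", "uuids", "unregister"]
--   for di in class_dict:
--     if di[0] == '_':
--       pop_list.append(di)
--
--   for p in pop_list:
--     try:
--       class_dict.pop(p)
--     except KeyError:
--       pass
--   for name in class_dict:
--     li.append(name)
--   return li
-- ===== SOURCE B (Python) =====
-- def check_attr(class_dict: dict) -> list[str]:
--     reserved = {"register", "all", "registered", "names", "uuids", "unregister"}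
--     return [name for name in class_dict if name[0] != '_' and name not in reserved]
-- ===== Notes on version B (the rewrite author's own statement) =====
-- stated objective: simpler
-- what changed: Replaces A's copy-the-dict / build-a-pop-list / pop-each-key / collect-remaining pipeline with a single forward pass that keeps a key iff it does not start with '_' and is not in the reserved set.
import Mathlib
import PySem

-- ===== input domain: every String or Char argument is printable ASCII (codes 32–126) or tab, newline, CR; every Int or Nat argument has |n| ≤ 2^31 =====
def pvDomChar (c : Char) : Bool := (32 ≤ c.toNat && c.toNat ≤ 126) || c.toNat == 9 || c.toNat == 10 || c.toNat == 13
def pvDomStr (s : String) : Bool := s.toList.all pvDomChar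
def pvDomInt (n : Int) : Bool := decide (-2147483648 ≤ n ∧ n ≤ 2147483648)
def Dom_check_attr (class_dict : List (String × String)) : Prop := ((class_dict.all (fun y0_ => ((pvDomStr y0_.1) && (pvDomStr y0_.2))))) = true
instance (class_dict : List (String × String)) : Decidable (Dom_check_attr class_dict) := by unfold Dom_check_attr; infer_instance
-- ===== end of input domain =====

-- ===== PORT A =====
-- B replaces A's copy/pop-list/pop/collect pipeline with one keep-filter pass (objective: simpler).
def check_attr (class_dict : List (String × String)) : List String :=
  let li : List String := []
  let d : PySem.Dict String String :=
    class_dict.foldl (fun d kv => d.insert kv.1 kv.2) PySem.Dict.empty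
  let pop_list : List String :=
    d.keys.foldl (fun pl di =>
      if PySem.Str.pyGet? di 0 = some '_' then pl ++ [di] else pl)
      ["register", "all", "registered", "names", "uuids", "unregister"]
  let d2 := pop_list.foldl (fun d p => d.erase p) d
  d2.keys.foldl (fun li name => li ++ [name]) li

-- ===== PORT B =====
def check_attr_alt (class_dict : List (String × String)) : List String :=
  let reserved : PySem.Set String :=
    PySem.Set.ofList ["register", "all", "registered", "names", "uuids", "unregister"]
  (PySem.Set.ofList (class_dict.map (fun kv => kv.1))).filter
    (fun name => (PySem.Str.pyGet? name 0 != some '_') && !(PySem.Set.contains reserved name))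

-- ===== PRECONDITION & SPEC =====
-- Pre_ excludes dicts having "" among their keys: there A raises IndexError at di[0] (no value is returned), and B raises at name[0] too.
def Pre_check_attr (class_dict : List (String × String)) : Prop :=
  ∀ kv ∈ class_dict, kv.1 ≠ ""
instance (class_dict : List (String × String)) : Decidable (Pre_check_attr class_dict) := by
  unfold Pre_check_attr; infer_instance
def pvWitness_check_attr : (List (String × String)) := [("alpha", "1"), ("_hidden", "2"), ("all", "3")]
def Spec_check_attr (class_dict : List (String × String)) (out : List String) : Prop := out = check_attr_alt class_dict
instance (class_dict : List (String × String)) (out : List String) : Decidable (Spec_check_attr class_dict out) := by unfold Spec_check_attr; infer_instance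

-- ===== CLAIM (what is proved, stated in full; the proofs are below) =====
def Claim_equal_check_attr : Prop := ∀ (class_dict : List (String × String)), Dom_check_attr class_dict → Pre_check_attr class_dict → Spec_check_attr class_dict (check_attr class_dict)

-- ===== LEMMAS AND PROOFS =====

-- the pop loop: popping every key of pl filters the items of d
theorem items_foldl_erase (pl : List String) (d : PySem.Dict String String) :
    (pl.foldl (fun d p => d.erase p) d).items
      = d.items.filter (fun kv => !(pl.contains kv.1)) := by
  induction pl generalizing d with
  | nil => simp
  | cons p pl ih =>
      rw [List.foldl_cons, ih]
      simp only [PySem.Dict.erase, List.filter_filter]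
      apply List.filter_congr
      intro kv _
      simp only [List.contains_cons]
      cases h : (kv.1 == p)
      · simp [h, Bool.and_comm]
      · simp [h]

-- mapping first components through a key-filter commutes with filtering the keys
theorem map_fst_filter (pop : List String) (l : List (String × String)) :
    (l.filter (fun kv => !(pop.contains kv.1))).map (fun kv => kv.1)
      = (l.map (fun kv => kv.1)).filter (fun k => !(pop.contains k)) := by
  induction l with
  | nil => rfl
  | cons kv l ih =>
      cases h : pop.contains kv.1 with
      | false =>
          simp only [List.filter_cons, h, Bool.not_false, if_true, List.map_cons]
          exact congrArg (List.cons kv.1) ih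
      | true =>
          simp only [List.filter_cons, List.map_cons, h, Bool.not_true, Bool.false_eq_true,
            if_false]
          exact ih

-- "not in A's pop-list" is B's keep-predicate, for keys drawn from the dict's key set
theorem not_contains_pop_list (res ks : List String) (k : String) (hk : k ∈ ks)
    (pA : String → Bool) :
    (!((res ++ ks.filter pA).contains k)) = (!pA k && !res.contains k) := by
  have h2 : (ks.filter pA).contains k = pA k := by
    cases h : pA k <;> simp [List.mem_filter, h, hk]
  simp [Bool.not_or, hk, Bool.and_comm]

theorem check_attr_spec_aux (class_dict : List (String × String)) :
    check_attr class_dict = check_attr_alt class_dict := by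
  unfold check_attr check_attr_alt
  simp only [PySem.Dict.keys_foldl_insert_key (key := fun kv : String × String => kv.1)
      (f := fun _ kv => kv.2), PySem.Dict.keys_empty, PySem.Set.update_nil_left,
    PySem.List.foldl_append_ite_eq_filter,
    PySem.List.foldl_append_singleton_eq_map, List.map_id_fun', id, List.nil_append]
  simp only [PySem.Dict.keys, items_foldl_erase, map_fst_filter]
  rw [show ((class_dict.foldl (fun d kv => d.insert kv.1 kv.2) PySem.Dict.empty).items.map
        (fun kv => kv.1))
      = PySem.Set.ofList (class_dict.map (fun kv => kv.1)) from
    PySem.Dict.keys_foldl_insert_key class_dict (fun kv => kv.1) (fun _ kv => kv.2)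
      PySem.Dict.empty]
  apply List.filter_congr
  intro k hk
  rw [not_contains_pop_list _ _ _ hk]
  have hs : PySem.Set.ofList ["register", "all", "registered", "names", "uuids", "unregister"]
      = ["register", "all", "registered", "names", "uuids", "unregister"] := by decide
  simp only [hs, PySem.Set.contains, bne, Bool.beq_eq_decide_eq, List.contains_cons,
    List.contains_nil, Bool.or_false, Bool.not_or]

-- ===== VERDICT (by name: the statement is the Claim_ definition above) =====
theorem check_attr_spec : Claim_equal_check_attr := by
  intro cd _ _
  exact check_attr_spec_aux cd
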